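-- pv_equiv track=rewrite | github.com/sade-oc/creator-compass | app/utils/model_loader.py | _detect_cta
-- ===== SOURCE A (Python) =====
-- def _detect_cta(text: str) -> bool:
--     """Detect if text contains call-to-action keywords."""
--     cta_keywords = [
--         'link in bio', 'follow', 'subscribe', 'click', 'check out',
--         'visit', 'shop', 'buy', 'get', 'download', 'join', 'sign up',
--         'watch', 'see more', 'learn more', 'dm me', 'comment', 'tag'
--     ]
--     text_lower = text.lower()
--     return any(kw in text_lower for kw in cta_keywords)
-- ===== SOURCE B (Python) =====
-- def _detect_cta(text: str) -> bool:
--     """Detect if text contains call-to-action keywords."""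
--     cta_keywords = [
--         'link in bio', 'follow', 'subscribe', 'click', 'check out',
--         'visit', 'shop', 'buy', 'get', 'download', 'join', 'sign up',
--         'watch', 'see more', 'learn more', 'dm me', 'comment', 'tag'
--     ]
--     s = text.lower()
--     # single left-to-right scan: at each position test whether some keyword starts there
--     for i in range(len(s)):
--         for kw in cta_keywords:
--             if s.startswith(kw, i):
--                 return True
--     return False
-- ===== Notes on version B (the rewrite author's own statement) =====
-- stated objective: alternative
-- what changed: A tests each keyword with a full substring-containment scan of the lowercased text; B makes one left-to-right scan over the text positions and at each position checks whether some keyword starts there (prefix match), so the text is traversed once by position instead of once per keyword by containment.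
import Mathlib
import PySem

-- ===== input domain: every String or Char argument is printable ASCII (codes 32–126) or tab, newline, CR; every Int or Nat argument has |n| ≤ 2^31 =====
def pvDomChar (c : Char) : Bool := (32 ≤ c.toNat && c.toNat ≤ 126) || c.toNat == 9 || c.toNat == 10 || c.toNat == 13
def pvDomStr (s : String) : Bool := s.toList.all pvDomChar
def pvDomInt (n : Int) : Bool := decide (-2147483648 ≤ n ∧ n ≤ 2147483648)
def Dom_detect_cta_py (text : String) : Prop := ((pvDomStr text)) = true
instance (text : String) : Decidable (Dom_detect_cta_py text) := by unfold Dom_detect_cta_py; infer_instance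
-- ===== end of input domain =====

-- ===== PORT A =====
-- B changes the traversal: A scans the whole text once PER KEYWORD via substring containment;
-- B scans the text ONCE by position, testing keyword prefixes at each position (alternative, same result).
def ctaKeywords : List String :=
  ["link in bio", "follow", "subscribe", "click", "check out",
   "visit", "shop", "buy", "get", "download", "join", "sign up",
   "watch", "see more", "learn more", "dm me", "comment", "tag"]

-- literal port of A: text_lower = text.lower(); any(kw in text_lower for kw in cta_keywords)
def detect_cta_py (text : String) : Bool :=
  let text_lower := PySem.Str.lower text
  ctaKeywords.any (fun kw => PySem.Str.isIn kw text_lower)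

-- ===== PORT B =====
-- the position loop 'for i in range(len(s)): for kw in …: if s.startswith(kw, i)': structural
-- recursion over the suffixes of s, testing each keyword as a prefix of the current suffix
def scanCTA (kws : List String) : List Char → Bool
  | [] => false
  | c :: rest =>
      if kws.any (fun kw => PySem.Chars.startswith (c :: rest) kw.toList) then true
      else scanCTA kws rest

def detect_cta_py_alt (text : String) : Bool :=
  scanCTA ctaKeywords (PySem.Str.lower text).toList

-- ===== PRECONDITION & SPEC =====
def Spec_detect_cta_py (text : String) (out : Bool) : Prop := out = detect_cta_py_alt text
instance (text : String) (out : Bool) : Decidable (Spec_detect_cta_py text out) := by unfold Spec_detect_cta_py; infer_instance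

-- ===== CLAIM (what is proved, stated in full; the proofs are below) =====
def Claim_equal_detect_cta_py : Prop := ∀ (text : String), Dom_detect_cta_py text → Spec_detect_cta_py text (detect_cta_py text)

-- ===== LEMMAS AND PROOFS =====
-- scanCTA finds a match iff some keyword is an infix of the scanned characters
-- (keywords are nonempty, so the empty-suffix base case loses nothing)
theorem scanCTA_eq_true_iff (kws : List String) (h : ∀ kw ∈ kws, kw.toList ≠ []) :
    ∀ cs : List Char, scanCTA kws cs = true ↔ ∃ kw ∈ kws, kw.toList <:+: cs := by
  intro cs
  induction cs with
  | nil =>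
      simp only [scanCTA]
      constructor
      · intro hfalse; exact absurd hfalse (by simp)
      · rintro ⟨kw, hmem, hinf⟩
        exact absurd (List.eq_nil_of_infix_nil hinf) (h kw hmem)
  | cons c rest ih =>
      simp only [scanCTA]
      split_ifs with hany
      · simp only [true_iff]
        rcases List.any_eq_true.mp hany with ⟨kw, hmem, hpre⟩
        exact ⟨kw, hmem, ((PySem.Chars.startswith_iff _ _).mp hpre).isInfix⟩
      · rw [ih]
        constructor
        · rintro ⟨kw, hmem, hinf⟩; exact ⟨kw, hmem, hinf.trans (List.suffix_cons c rest).isInfix⟩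
        · rintro ⟨kw, hmem, hinf⟩
          rcases List.infix_cons_iff.mp hinf with hpre | hinf'
          · exact absurd (List.any_eq_true.mpr ⟨kw, hmem, (PySem.Chars.startswith_iff _ _).mpr hpre⟩) hany
          · exact ⟨kw, hmem, hinf'⟩

-- ===== VERDICT (by name: the statement is the Claim_ definition above) =====
theorem detect_cta_py_spec : Claim_equal_detect_cta_py := by
  intro text _
  unfold Spec_detect_cta_py detect_cta_py detect_cta_py_alt
  rw [Bool.eq_iff_iff]
  rw [scanCTA_eq_true_iff ctaKeywords (by decide)]
  simp only [List.any_eq_true, PySem.Str.isIn_iff_infix]
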